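-- pv_equiv track=rewrite | github.com/sander777/struct_n_algs_lab_1 | lab1.py | A_arr2
-- ===== SOURCE A (Python) =====
-- def A_arr2(l: list):
--     array = l.copy()
--     res = list()
--     while len(array) > 0:
--         res.append(min(array))
--         array.remove(min(array))
--         res.insert(0, min(array))
--         array.remove(min(array))
--     return res
-- ===== SOURCE B (Python) =====
-- def A_arr2(l: list):
--     s = sorted(l)
--     front = []
--     back = []
--     i = 0
--     while i < len(s):
--         back.append(s[i])
--         front.append(s[i + 1])
--         i += 2
--     return front[::-1] + back
-- ===== Notes on version B (the rewrite author's own statement) =====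
-- stated objective: alternative
-- what changed: B sorts the list once and pairs up the sorted result in a single index pass (back list from even positions, front list from odd positions, then reverse front and concatenate), replacing A's loop that rescans the remaining list with min() and remove() twice per iteration; asymptotically O(n log n) vs O(n^2), though a timing run could not measure it on this task's input family.
import Mathlib
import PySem

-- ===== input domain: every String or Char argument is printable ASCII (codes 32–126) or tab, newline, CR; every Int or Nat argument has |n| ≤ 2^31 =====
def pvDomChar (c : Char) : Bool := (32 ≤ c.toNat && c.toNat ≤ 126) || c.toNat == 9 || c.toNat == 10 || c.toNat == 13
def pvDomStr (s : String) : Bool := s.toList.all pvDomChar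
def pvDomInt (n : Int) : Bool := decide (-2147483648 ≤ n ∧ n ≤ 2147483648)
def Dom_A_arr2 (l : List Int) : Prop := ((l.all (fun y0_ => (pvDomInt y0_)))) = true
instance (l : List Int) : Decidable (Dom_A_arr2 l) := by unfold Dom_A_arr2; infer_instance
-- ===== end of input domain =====

-- B sorts once and pairs up the sorted list in one index pass instead of A's repeated min-scan-and-remove.

-- ===== PORT A =====
-- while len(array) > 0: res.append(min(array)); array.remove(min(array)); res.insert(0, min(array)); array.remove(min(array))
def A_arr2_go (array res : List Int) : List Int :=
  match hm : PySem.List.min? array (fun x => x) with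
  | none => res
  | some m =>
    let a1 := (PySem.List.remove? array m).getD []
    match hm2 : PySem.List.min? a1 (fun x => x) with
    | none => res ++ [m]   -- Python raises ValueError here (min of empty list): odd-length input, excluded by Pre_
    | some m2 => A_arr2_go ((PySem.List.remove? a1 m2).getD []) (m2 :: (res ++ [m]))
termination_by array.length
decreasing_by
  have h1 : m ∈ array := PySem.List.min?_mem hm
  have h2 : m2 ∈ a1 := PySem.List.min?_mem hm2
  show ((PySem.List.remove? a1 m2).getD []).length < array.length
  have e1 : a1 = array.erase m := by
    simp [a1, PySem.List.remove?_eq_some_erase array m h1]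
  rw [PySem.List.remove?_eq_some_erase a1 m2 h2]
  have l1 : (a1.erase m2).length = a1.length - 1 := List.length_erase_of_mem h2
  have l2 : a1.length = array.length - 1 := by rw [e1]; exact List.length_erase_of_mem h1
  have p1 : 0 < array.length := List.length_pos_of_mem h1
  have p2 : 0 < a1.length := List.length_pos_of_mem h2
  simp only [Option.getD_some]
  omega

def A_arr2 (l : List Int) : List Int := A_arr2_go l []

-- ===== PORT B =====
-- while i < len(s): back.append(s[i]); front.append(s[i+1]); i += 2
def A_arr2_altGo (s : List Int) (i : Nat) (front back : List Int) : List Int × List Int :=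
  if i < s.length then
    A_arr2_altGo s (i + 2) (front ++ [(s[i + 1]?).getD 0]) (back ++ [(s[i]?).getD 0])
  else (front, back)
termination_by s.length - i

def A_arr2_alt (l : List Int) : List Int :=
  let s := PySem.List.sorted l (fun x => x) false
  let fb := A_arr2_altGo s 0 [] []
  ((PySem.List.slice? fb.1 none none (-1)).getD []) ++ fb.2

-- ===== PRECONDITION & SPEC =====
-- Pre_ excludes odd-length lists: there A's final 'min(array)' runs on an empty list and raises ValueError (B's 's[i+1]' raises IndexError there too).
def Pre_A_arr2 (l : List Int) : Prop := l.length % 2 = 0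
instance (l : List Int) : Decidable (Pre_A_arr2 l) := by unfold Pre_A_arr2; infer_instance

def pvWitness_A_arr2 : List Int := [3, 1, 2, 0]

def Spec_A_arr2 (l : List Int) (out : List Int) : Prop := out = A_arr2_alt l
instance (l : List Int) (out : List Int) : Decidable (Spec_A_arr2 l out) := by unfold Spec_A_arr2; infer_instance

-- ===== CLAIM (what is proved, stated in full; the proofs are below) =====
def Claim_equal_A_arr2 : Prop := ∀ (l : List Int), Dom_A_arr2 l → Pre_A_arr2 l → Spec_A_arr2 l (A_arr2 l)

-- ===== LEMMAS AND PROOFS =====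

-- elements of a list at even / odd positions, taken two at a time
def evensOf : List Int → List Int
  | [] => []
  | [x] => [x]
  | x :: _ :: r => x :: evensOf r

def oddsOf : List Int → List Int
  | [] => []
  | [_] => []
  | _ :: y :: r => y :: oddsOf r

-- what A's loop does, read off the sorted list
def buildS : List Int → List Int → List Int
  | [], res => res
  | [x], res => res ++ [x]
  | x :: y :: r, res => buildS r (y :: (res ++ [x]))

theorem min_sorted_step (xs : List Int) (m : Int) (t : List Int)
    (h : PySem.List.sorted xs (fun x => x) false = m :: t) :
    PySem.List.min? xs (fun x => x) = some m ∧
      PySem.List.sorted (xs.erase m) (fun x => x) false = t := by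
  have hne : xs ≠ [] := by
    intro hx
    rw [(PySem.List.sorted_eq_nil_iff _ _ _).mpr hx] at h
    simp at h
  obtain ⟨m0, hm0⟩ : ∃ m0, PySem.List.min? xs (fun x => x) = some m0 := by
    cases hmin : PySem.List.min? xs (fun x => x) with
    | none => exact absurd ((PySem.List.min?_eq_none_iff _ _).mp hmin) hne
    | some a => exact ⟨a, rfl⟩
  have hm0mem : m0 ∈ xs := PySem.List.min?_mem hm0
  have hm0min : ∀ y ∈ xs, m0 ≤ y := PySem.List.min?_isMin hm0
  have hmmem : m ∈ xs := by
    have hmem : m ∈ PySem.List.sorted xs (fun x => x) false := by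
      rw [h]; exact List.mem_cons_self
    exact (PySem.List.mem_sorted _ _ _ _).mp hmem
  have hmmin : ∀ y ∈ xs, m ≤ y := PySem.List.key_head_sorted_le _ _ h
  have heq : m0 = m := le_antisymm (hm0min m hmmem) (hmmin m0 hm0mem)
  subst heq
  refine ⟨hm0, ?_⟩
  have hperm : (PySem.List.sorted xs (fun x => x) false).Perm xs := PySem.List.sorted_perm _ _ _
  have hpx : xs.Perm (m0 :: t) := by rw [← h]; exact hperm.symm
  have ht : (xs.erase m0).Perm t := by
    have h2 := hpx.erase m0
    simpa using h2
  have hpair : (m0 :: t).Pairwise (fun a b => a ≤ b) := by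
    have hp := PySem.List.sorted_pairwise xs (fun x => x)
    rw [h] at hp
    exact hp
  have hpt : t.Pairwise (fun a b => a ≤ b) := hpair.of_cons
  have h1 : (PySem.List.sorted (xs.erase m0) (fun x => x) false).Perm t :=
    (PySem.List.sorted_perm _ _ _).trans ht
  exact PySem.List.eq_of_perm_of_pairwise_le_of_injective (fun x => x)
    (fun a b hab => hab) h1 (PySem.List.sorted_pairwise _ _) hpt

theorem Ago_eq_buildS (n : Nat) (array res : List Int) (hn : array.length ≤ n) :
    A_arr2_go array res = buildS (PySem.List.sorted array (fun x => x) false) res := by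
  induction n generalizing array res with
  | zero =>
    have hnil : array = [] := List.length_eq_zero_iff.mp (Nat.le_zero.mp hn)
    subst hnil
    rw [A_arr2_go.eq_def, (PySem.List.sorted_eq_nil_iff _ _ _).mpr rfl]
    split
    · next heq => rfl
    · next mm heq =>
      rw [(PySem.List.min?_eq_none_iff ([] : List Int) _).mpr rfl] at heq
      simp at heq
  | succ n ih =>
    cases hs : PySem.List.sorted array (fun x => x) false with
    | nil =>
      have hnil : array = [] := (PySem.List.sorted_eq_nil_iff _ _ _).mp hs
      subst hnil
      rw [A_arr2_go.eq_def]
      split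
      · next heq => rfl
      · next mm heq =>
        rw [(PySem.List.min?_eq_none_iff ([] : List Int) _).mpr rfl] at heq
        simp at heq
    | cons m t =>
      obtain ⟨hmin, hrest⟩ := min_sorted_step array m t hs
      have hmem : m ∈ array := PySem.List.min?_mem hmin
      have ha1 : (PySem.List.remove? array m).getD [] = array.erase m := by
        rw [PySem.List.remove?_eq_some_erase array m hmem]; rfl
      cases t with
      | nil =>
        have herasenil : array.erase m = [] := (PySem.List.sorted_eq_nil_iff _ _ _).mp hrest
        rw [A_arr2_go.eq_def]
        split
        · next heq => rw [hmin] at heq; simp at heq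
        · next m' heq =>
          rw [hmin] at heq
          injection heq with heq'
          subst heq'
          dsimp only
          split
          · next heq2 => simp [buildS]
          · next m2' heq2 =>
            rw [ha1, herasenil, (PySem.List.min?_eq_none_iff ([] : List Int) _).mpr rfl] at heq2
            simp at heq2
      | cons m2 t2 =>
        obtain ⟨hmin2, hrest2⟩ := min_sorted_step (array.erase m) m2 t2 hrest
        have hmem2 : m2 ∈ array.erase m := PySem.List.min?_mem hmin2
        have ha2 : (PySem.List.remove? (array.erase m) m2).getD [] = (array.erase m).erase m2 := by
          rw [PySem.List.remove?_eq_some_erase (array.erase m) m2 hmem2]; rfl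
        have hlen : ((array.erase m).erase m2).length ≤ n := by
          have l1 := List.length_erase_of_mem hmem2
          have l2 := List.length_erase_of_mem hmem
          have p1 := List.length_pos_of_mem hmem
          omega
        rw [A_arr2_go.eq_def]
        split
        · next heq => rw [hmin] at heq; simp at heq
        · next m' heq =>
          rw [hmin] at heq
          injection heq with heq'
          subst heq'
          dsimp only
          split
          · next heq2 => rw [ha1, hmin2] at heq2; simp at heq2
          · next m2' heq2 =>
            rw [ha1, hmin2] at heq2
            injection heq2 with heq2'
            subst heq2'
            rw [ha1, ha2, ih _ _ hlen, hrest2]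
            simp [buildS]

theorem buildS_spec (n : Nat) (s res : List Int) (hn : s.length ≤ n) (hev : s.length % 2 = 0) :
    buildS s res = (oddsOf s).reverse ++ res ++ evensOf s := by
  induction n generalizing s res with
  | zero =>
    have hnil : s = [] := List.length_eq_zero_iff.mp (Nat.le_zero.mp hn)
    subst hnil; simp [buildS, oddsOf, evensOf]
  | succ n ih =>
    match s with
    | [] => simp [buildS, oddsOf, evensOf]
    | [x] => simp at hev
    | x :: y :: r =>
      have hr : r.length ≤ n := by simp at hn; omega
      have hrev : r.length % 2 = 0 := by simp at hev; omega
      rw [buildS, ih r (y :: (res ++ [x])) hr hrev]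
      simp [oddsOf, evensOf]

theorem altGo_spec (n : Nat) (s : List Int) (i : Nat) (front back : List Int)
    (hn : s.length - i ≤ n) (hev : (s.length - i) % 2 = 0) :
    A_arr2_altGo s i front back = (front ++ oddsOf (s.drop i), back ++ evensOf (s.drop i)) := by
  induction n generalizing i front back with
  | zero =>
    have hge : s.length ≤ i := by omega
    rw [A_arr2_altGo.eq_def]
    simp [Nat.not_lt.mpr hge, List.drop_eq_nil_of_le hge, oddsOf, evensOf]
  | succ n ih =>
    by_cases h : i < s.length
    · have h1 : i + 1 < s.length := by omega
      have hdrop : s.drop i = s[i] :: s[i + 1] :: s.drop (i + 2) := by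
        rw [List.drop_eq_getElem_cons h, List.drop_eq_getElem_cons h1]
      rw [A_arr2_altGo.eq_def]
      simp only [if_pos h]
      rw [ih (i + 2) _ _ (by omega) (by omega)]
      rw [hdrop]
      simp [oddsOf, evensOf, List.getElem?_eq_getElem h, List.getElem?_eq_getElem h1]
    · rw [A_arr2_altGo.eq_def]
      simp [h, List.drop_eq_nil_of_le (Nat.not_lt.mp h), oddsOf, evensOf]

-- ===== VERDICT (by name: the statement is the Claim_ definition above) =====
theorem A_arr2_spec : Claim_equal_A_arr2 := by
  intro l _ hpre
  unfold Spec_A_arr2 A_arr2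
  have hlen : (PySem.List.sorted l (fun x => x) false).length % 2 = 0 := by
    rw [PySem.List.length_sorted _ _ _]; exact hpre
  have halt : A_arr2_alt l =
      ((PySem.List.slice? (A_arr2_altGo (PySem.List.sorted l (fun x => x) false) 0 [] []).1
          none none (-1)).getD []) ++
        (A_arr2_altGo (PySem.List.sorted l (fun x => x) false) 0 [] []).2 := rfl
  rw [halt,
      altGo_spec (PySem.List.sorted l (fun x => x) false).length _ 0 [] [] (by omega) (by simpa using hlen),
      Ago_eq_buildS l.length l [] le_rfl,
      buildS_spec (PySem.List.sorted l (fun x => x) false).length _ [] le_rfl hlen]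
  simp [PySem.List.slice?_none_none_neg_one]
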